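-- pv_equiv track=rewrite | github.com/MatiPl01/Algorytmy-i-struktury-danych | Kolokwia/2018-2019/2. Kolokwium zaliczeniowe/zad2.py | longest_easy_path
-- ===== SOURCE A (Python) =====
-- def longest_easy_path(G):
--     n = len(G)
--     visited = [False] * n
--
--     def dfs(u):
--         visited[u] = True
--         length = 0
--         for v in G[u]:
--             if not visited[v] and len(G[v]) <= 2:
--                 length += dfs(v) + 1
--         return length
--
--     max_length = 0
--     for u in range(n):
--         # If not visited and has a degree at most 2
--         if not visited[u] and len(G[u]) <= 2:
--             max_length = max(max_length, dfs(u))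
--
--     return max_length
-- ===== SOURCE B (Python) =====
-- def longest_easy_path(G):
--     # Iterative explicit-stack flood fill: per component count marked vertices,
--     # answer is max(component_size - 1); same visit order as a recursive DFS.
--     n = len(G)
--     visited = [False] * n
--     best = 0
--     for u in range(n):
--         if not visited[u] and len(G[u]) <= 2:
--             visited[u] = True
--             count = 1
--             stack = [list(G[u])]
--             while stack:
--                 frame = stack[-1]
--                 if not frame:
--                     stack.pop()
--                     continue
--                 v = frame.pop(0)
--                 if not visited[v] and len(G[v]) <= 2:
--                     visited[v] = True
--                     count += 1
--                     stack.append(list(G[v]))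
--             best = max(best, count - 1)
--     return best
-- ===== Notes on version B (the rewrite author's own statement) =====
-- stated objective: alternative
-- what changed: The recursive dfs that sums dfs(v)+1 over neighbours is replaced by an iterative explicit-stack flood fill that counts the vertices it marks per component and takes max(best, count-1); no recursion, no per-call length accumulation.
import Mathlib
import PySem

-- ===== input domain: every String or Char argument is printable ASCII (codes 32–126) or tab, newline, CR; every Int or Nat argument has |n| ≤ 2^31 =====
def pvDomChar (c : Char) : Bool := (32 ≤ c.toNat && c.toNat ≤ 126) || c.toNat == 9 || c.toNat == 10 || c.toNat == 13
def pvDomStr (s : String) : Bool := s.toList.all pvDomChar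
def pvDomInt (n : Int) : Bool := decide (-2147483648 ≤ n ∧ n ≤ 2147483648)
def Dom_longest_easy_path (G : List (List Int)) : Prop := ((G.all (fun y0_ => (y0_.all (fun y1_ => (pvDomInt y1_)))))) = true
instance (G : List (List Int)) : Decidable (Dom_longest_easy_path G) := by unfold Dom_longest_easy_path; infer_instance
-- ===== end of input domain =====

-- B replaces A's recursive dfs (summing dfs(v)+1) by an iterative explicit-stack flood
-- fill counting marked vertices per component (answer = max over components of count-1);
-- alternative decomposition, same asymptotic cost.

-- ===== PORT A =====
-- shared accessors: `G[v]` / `visited[v]` with Python index semantics (negative wrap)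
def pvNbrs (G : List (List Int)) (v : Int) : List Int := (PySem.List.pyGet? G v).getD []
def pvSeen (vis : List Bool) (v : Int) : Bool := (PySem.List.pyGet? vis v).getD true

-- A's `dfs`, fuelled (each nested call marks a fresh vertex, so fuel = n never runs out;
-- proved as part of the equivalence).  Returns (visited, length).
def dfsA (G : List (List Int)) : Nat → List Bool → Int → List Bool × Int
  | 0, vis, _ => (vis, 0)
  | f+1, vis, u =>
    (pvNbrs G u).foldl
      (fun p v =>
        if pvSeen p.1 v = false ∧ (pvNbrs G v).length ≤ 2 then
          (((dfsA G f p.1 v).1), p.2 + ((dfsA G f p.1 v).2 + 1))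
        else p)
      (PySem.List.pySetD vis u true, 0)

def longest_easy_path (G : List (List Int)) : Int :=
  ((PySem.List.pyRange 0 (G.length : Int) 1).foldl
    (fun p u =>
      if pvSeen p.1 u = false ∧ (pvNbrs G u).length ≤ 2 then
        (((dfsA G G.length p.1 u).1), max p.2 (dfsA G G.length p.1 u).2)
      else p)
    (List.replicate G.length false, (0 : Int))).2

-- ===== PORT B =====
-- termination helper for the while loop: marking flips one `false` in `visited` to `true`
theorem count_set_true (xs : List Bool) : ∀ (k : Nat), xs[k]? = some false →
    (xs.set k true).count false + 1 = xs.count false := by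
  induction xs with
  | nil => intro k h; simp at h
  | cons x t ih =>
    intro k h
    cases k with
    | zero => simp at h; subst h; simp
    | succ k =>
      simp only [List.getElem?_cons_succ] at h
      simp [List.count_cons]
      have := ih k h
      omega

theorem pvMark_count (vis : List Bool) (v : Int)
    (h : (PySem.List.pyGet? vis v).getD true = false) :
    (PySem.List.pySetD vis v true).count false + 1 = vis.count false := by
  cases hx : PySem.List.pyGet? vis v with
  | none => rw [hx] at h; simp at h
  | some b =>
    rw [hx] at h; simp at h; subst h
    rw [PySem.List.pyGet?] at hx
    rcases Option.bind_eq_some_iff.mp hx with ⟨k, hk1, hk2⟩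
    rw [show PySem.List.pySetD vis v true = vis.set k true from by
      simp [PySem.List.pySetD, PySem.List.pySet?, hk1]]
    exact count_set_true vis k hk2


-- Source B's while loop over the explicit stack of pending-neighbour frames
def loopB (G : List (List Int)) (vis : List Bool) (st : List (List Int)) (c : Int) :
    List Bool × Int :=
  match st with
  | [] => (vis, c)
  | [] :: rest => loopB G vis rest c
  | (v :: vs) :: rest =>
    if h : pvSeen vis v = false ∧ (pvNbrs G v).length ≤ 2 then
      loopB G (PySem.List.pySetD vis v true) (pvNbrs G v :: vs :: rest) (c + 1)
    else
      loopB G vis (vs :: rest) c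
termination_by (vis.count false, (st.map (fun l => l.length + 1)).sum)
decreasing_by
  all_goals simp_wf
  · exact Prod.Lex.right _ (by omega)
  · exact Prod.Lex.left _ _ (by have := pvMark_count vis v h.1; omega)
  · exact Prod.Lex.right _ (by omega)

def longest_easy_path_alt (G : List (List Int)) : Int :=
  ((PySem.List.pyRange 0 (G.length : Int) 1).foldl
    (fun p u =>
      if pvSeen p.1 u = false ∧ (pvNbrs G u).length ≤ 2 then
        (((loopB G (PySem.List.pySetD p.1 u true) [pvNbrs G u] 1).1),
          max p.2 ((loopB G (PySem.List.pySetD p.1 u true) [pvNbrs G u] 1).2 - 1))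
      else p)
    (List.replicate G.length false, (0 : Int))).2

-- ===== PRECONDITION & SPEC =====
-- A evaluates `visited[v]` exactly for the entries v of degree-≤2 rows (its outer loop
-- eventually visits every degree-≤2 vertex and scans its whole row; rows of degree > 2 are
-- never scanned), so A raises IndexError iff some row of length ≤ 2 has an entry outside
-- Python's index range [-n, n); Pre_ excludes exactly those inputs.
def Pre_longest_easy_path (G : List (List Int)) : Prop :=
  ∀ l ∈ G, l.length ≤ 2 → ∀ v ∈ l, PySem.Raise.InRange G.length v
instance (G : List (List Int)) : Decidable (Pre_longest_easy_path G) := by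
  unfold Pre_longest_easy_path; infer_instance

def pvWitness_longest_easy_path : List (List Int) := [[1], [0], [0, 1, -1]]

def Spec_longest_easy_path (G : List (List Int)) (out : Int) : Prop := out = longest_easy_path_alt G
instance (G : List (List Int)) (out : Int) : Decidable (Spec_longest_easy_path G out) := by
  unfold Spec_longest_easy_path; infer_instance

-- ===== CLAIM (what is proved, stated in full; the proofs are below) =====
def Claim_equal_longest_easy_path : Prop := ∀ (G : List (List Int)), Dom_longest_easy_path G → Pre_longest_easy_path G → Spec_longest_easy_path G (longest_easy_path G)

-- ===== LEMMAS AND PROOFS =====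

-- helper: a single step of A's neighbour loop (named form of the lambda in dfsA)
def dfsStep (G : List (List Int)) (f : Nat) (p : List Bool × Int) (v : Int) : List Bool × Int :=
  if pvSeen p.1 v = false ∧ (pvNbrs G v).length ≤ 2 then
    (((dfsA G f p.1 v).1), p.2 + ((dfsA G f p.1 v).2 + 1))
  else p

theorem dfsA_succ (G : List (List Int)) (f : Nat) (vis : List Bool) (u : Int) :
    dfsA G (f+1) vis u = (pvNbrs G u).foldl (dfsStep G f) (PySem.List.pySetD vis u true, 0) := rfl

-- named forms of the outer-loop bodies of the two ports
def aStep (G : List (List Int)) (p : List Bool × Int) (u : Int) : List Bool × Int :=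
  if pvSeen p.1 u = false ∧ (pvNbrs G u).length ≤ 2 then
    (((dfsA G G.length p.1 u).1), max p.2 (dfsA G G.length p.1 u).2)
  else p

def bStep (G : List (List Int)) (p : List Bool × Int) (u : Int) : List Bool × Int :=
  if pvSeen p.1 u = false ∧ (pvNbrs G u).length ≤ 2 then
    (((loopB G (PySem.List.pySetD p.1 u true) [pvNbrs G u] 1).1),
      max p.2 ((loopB G (PySem.List.pySetD p.1 u true) [pvNbrs G u] 1).2 - 1))
  else p

theorem loopB_nil (G : List (List Int)) (vis : List Bool) (c : Int) :
    loopB G vis [] c = (vis, c) := by rw [loopB]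

theorem loopB_pop (G : List (List Int)) (vis : List Bool) (rest : List (List Int)) (c : Int) :
    loopB G vis ([] :: rest) c = loopB G vis rest c := by rw [loopB]

theorem loopB_cons (G : List (List Int)) (vis : List Bool) (v : Int) (vs : List Int)
    (rest : List (List Int)) (c : Int) :
    loopB G vis ((v :: vs) :: rest) c =
      if pvSeen vis v = false ∧ (pvNbrs G v).length ≤ 2 then
        loopB G (PySem.List.pySetD vis v true) (pvNbrs G v :: vs :: rest) (c + 1)
      else loopB G vis (vs :: rest) c := by
  rw [loopB]; split <;> rfl

-- generic invariant carried through a foldl over (visited, acc) pairs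
theorem foldl_inv {α : Type} (step : (List Bool × Int) → α → (List Bool × Int))
    (P : List Bool → Prop) (hstep : ∀ p v, P p.1 → P (step p v).1) :
    ∀ (l : List α) (p : List Bool × Int), P p.1 → P (l.foldl step p).1 := by
  intro l
  induction l with
  | nil => intro p hp; exact hp
  | cons v vs ih => intro p hp; exact ih _ (hstep p v hp)

theorem count_set_true_le (xs : List Bool) : ∀ (k : Nat),
    (xs.set k true).count false ≤ xs.count false := by
  induction xs with
  | nil => intro k; simp
  | cons x t ih =>
    intro k
    cases k with
    | zero => cases x <;> simp
    | succ k => simp [List.count_cons]; have := ih k; omega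

theorem pvSetD_count_le (vis : List Bool) (v : Int) :
    (PySem.List.pySetD vis v true).count false ≤ vis.count false := by
  unfold PySem.List.pySetD PySem.List.pySet?
  cases PySem.List.pyIdx? vis.length v with
  | none => simp
  | some k => simpa using count_set_true_le vis k

theorem countA (G : List (List Int)) (f : Nat) :
    ∀ (vis : List Bool) (u : Int), (dfsA G f vis u).1.count false ≤ vis.count false := by
  induction f with
  | zero => intro vis u; simp [dfsA]
  | succ f ih =>
    intro vis u
    rw [dfsA_succ]
    have h := foldl_inv (dfsStep G f)
      (fun w => w.count false ≤ (PySem.List.pySetD vis u true).count false)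
      (fun p v hp => by
        unfold dfsStep
        split
        · exact le_trans (ih p.1 v) hp
        · exact hp)
      (pvNbrs G u) (PySem.List.pySetD vis u true, 0) (le_refl _)
    exact le_trans h (pvSetD_count_le vis u)

theorem countFold (G : List (List Int)) (f : Nat) (l : List Int) (p : List Bool × Int) :
    (l.foldl (dfsStep G f) p).1.count false ≤ p.1.count false :=
  foldl_inv (dfsStep G f) (fun w => w.count false ≤ p.1.count false)
    (fun q v hq => by
      unfold dfsStep
      split
      · exact le_trans (countA G f q.1 v) hq
      · exact hq) l p (le_refl _)

theorem lenA (G : List (List Int)) (f : Nat) :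
    ∀ (vis : List Bool) (u : Int), (dfsA G f vis u).1.length = vis.length := by
  induction f with
  | zero => intro vis u; simp [dfsA]
  | succ f ih =>
    intro vis u
    rw [dfsA_succ]
    have h := foldl_inv (dfsStep G f) (fun w => w.length = vis.length)
      (fun p v hp => by
        unfold dfsStep
        split
        · rw [ih p.1 v]; exact hp
        · exact hp)
      (pvNbrs G u) (PySem.List.pySetD vis u true, 0) (by simp [PySem.List.length_pySetD])
    exact h

theorem dfsFold_shift (G : List (List Int)) (f : Nat) : ∀ (l : List Int) (vis : List Bool) (a : Int),
    l.foldl (dfsStep G f) (vis, a) =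
      ((l.foldl (dfsStep G f) (vis, 0)).1, a + (l.foldl (dfsStep G f) (vis, 0)).2) := by
  intro l
  induction l with
  | nil => intro vis a; simp
  | cons v vs ih =>
    intro vis a
    simp only [List.foldl_cons]
    by_cases hg : pvSeen vis v = false ∧ (pvNbrs G v).length ≤ 2
    · rw [show dfsStep G f (vis, a) v = ((dfsA G f vis v).1, a + ((dfsA G f vis v).2 + 1)) from by
          simp [dfsStep, hg],
        show dfsStep G f (vis, 0) v = ((dfsA G f vis v).1, 0 + ((dfsA G f vis v).2 + 1)) from by
          simp [dfsStep, hg]]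
      rw [ih, ih ((dfsA G f vis v).1) (0 + ((dfsA G f vis v).2 + 1))]
      simp only [Prod.mk.injEq]
      refine ⟨trivial, by ring⟩
    · rw [show dfsStep G f (vis, a) v = (vis, a) from by simp [dfsStep, hg],
        show dfsStep G f (vis, 0) v = (vis, 0) from by simp [dfsStep, hg]]
      exact ih vis a

theorem key (G : List (List Int)) : ∀ (k : Nat) (vis : List Bool), vis.count false = k →
    ∀ (f : Nat), vis.count false ≤ f → ∀ (l : List Int) (rest : List (List Int)) (c : Int),
    loopB G vis (l :: rest) c =
      loopB G (l.foldl (dfsStep G f) (vis, 0)).1 rest (c + (l.foldl (dfsStep G f) (vis, 0)).2) := by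
  intro k
  induction k using Nat.strong_induction_on with
  | _ k IH =>
    intro vis hk f hf l
    induction l with
    | nil =>
      intro rest c
      rw [loopB_pop]
      simp
    | cons v vs ih =>
      intro rest c
      by_cases hg : pvSeen vis v = false ∧ (pvNbrs G v).length ≤ 2
      · have hset := pvMark_count vis v hg.1
        obtain ⟨g, rfl⟩ : ∃ g, f = g + 1 := ⟨f - 1, by omega⟩
        rw [loopB_cons, if_pos hg]
        have h1 := IH (vis.count false - 1) (by omega) (PySem.List.pySetD vis v true)
          (by omega) g (by omega) (pvNbrs G v) (vs :: rest) (c + 1)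
        rw [h1]
        have hqA : dfsA G (g + 1) vis v
            = (pvNbrs G v).foldl (dfsStep G g) (PySem.List.pySetD vis v true, 0) :=
          dfsA_succ G g vis v
        set q := (pvNbrs G v).foldl (dfsStep G g) (PySem.List.pySetD vis v true, 0) with hq
        have hq1 : q.1.count false ≤ vis.count false - 1 := by
          have := countFold G g (pvNbrs G v) (PySem.List.pySetD vis v true, 0)
          simp only [← hq] at this
          omega
        have h2 := IH (q.1.count false) (by omega) q.1 rfl (g + 1) (by omega) vs rest
          (c + 1 + q.2)
        rw [h2]
        simp only [List.foldl_cons]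
        rw [show dfsStep G (g + 1) (vis, 0) v = (q.1, 0 + (q.2 + 1)) from by
          simp [dfsStep, hg, hqA]]
        rw [dfsFold_shift G (g + 1) vs q.1 (0 + (q.2 + 1))]
        congr 1
        omega
      · rw [loopB_cons, if_neg hg]
        rw [ih rest c]
        simp only [List.foldl_cons]
        rw [show dfsStep G f (vis, 0) v = (vis, 0) from by simp [dfsStep, hg]]


theorem stepEq (G : List (List Int)) (p : List Bool × Int) (u : Int)
    (hp : p.1.length = G.length) : aStep G p u = bStep G p u := by
  unfold aStep bStep
  by_cases hg : pvSeen p.1 u = false ∧ (pvNbrs G u).length ≤ 2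
  · rw [if_pos hg, if_pos hg]
    have hset := pvMark_count p.1 u hg.1
    have hcl : p.1.count false ≤ p.1.length := List.count_le_length
    obtain ⟨m, hm⟩ : ∃ m, G.length = m + 1 := ⟨G.length - 1, by omega⟩
    have hA : dfsA G G.length p.1 u
        = (pvNbrs G u).foldl (dfsStep G m) (PySem.List.pySetD p.1 u true, 0) := by
      rw [hm]; exact dfsA_succ G m p.1 u
    have hk := key G ((PySem.List.pySetD p.1 u true).count false)
      (PySem.List.pySetD p.1 u true) rfl m (by omega) (pvNbrs G u) [] 1
    rw [show ([pvNbrs G u] : List (List Int)) = pvNbrs G u :: [] from rfl, hk,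
      loopB_nil, hA]
    congr 1
    omega
  · rw [if_neg hg, if_neg hg]

theorem aStep_len (G : List (List Int)) (p : List Bool × Int) (u : Int)
    (hp : p.1.length = G.length) : (aStep G p u).1.length = G.length := by
  unfold aStep
  split
  · rw [lenA]; exact hp
  · exact hp

theorem fold_eq (G : List (List Int)) : ∀ (us : List Int) (p : List Bool × Int),
    p.1.length = G.length → us.foldl (aStep G) p = us.foldl (bStep G) p := by
  intro us
  induction us with
  | nil => intro p _; rfl
  | cons u us ih =>
    intro p hp
    simp only [List.foldl_cons]
    rw [← stepEq G p u hp]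
    exact ih _ (aStep_len G p u hp)

theorem ports_eq (G : List (List Int)) : longest_easy_path G = longest_easy_path_alt G := by
  show ((PySem.List.pyRange 0 (G.length : Int) 1).foldl (aStep G)
      (List.replicate G.length false, (0 : Int))).2
    = ((PySem.List.pyRange 0 (G.length : Int) 1).foldl (bStep G)
      (List.replicate G.length false, (0 : Int))).2
  rw [fold_eq G (PySem.List.pyRange 0 (G.length : Int) 1) _ (by simp)]

-- ===== VERDICT (by name: the statement is the Claim_ definition above) =====
theorem longest_easy_path_spec : Claim_equal_longest_easy_path := by
  intro G _ _
  exact ports_eq G
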